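-- pv_equiv track=rewrite | github.com/metaphacts/metaphacts-etl-pipeline | assets/incremental-updates/commons/commons.py | divide_chunks_generator
-- ===== SOURCE A (Python) =====
-- def divide_chunks_generator(l, n):
--     idx = 0
--     ls = []
--     for item in l:
--         ls.append(item)
--         if len(ls)>n:
--             response = ls
--             ls = []
--             idx = idx + 1
--             yield idx, response
--     if len(ls)>0:
--         idx = idx + 1
--         yield idx, ls
-- ===== SOURCE B (Python) =====
-- def divide_chunks_generator(l, n):
--     items = list(l)
--     step = max(n + 1, 1)
--     for i, start in enumerate(range(0, len(items), step), start=1):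
--         yield i, items[start:start + step]
-- ===== Notes on version B (the rewrite author's own statement) =====
-- stated objective: alternative
-- what changed: Replaced A's per-item append-and-compare accumulation with precomputed boundary slicing: B materializes the iterable and emits items[i:i+step] for step = max(n+1, 1) with a 1-based enumerate.
import Mathlib
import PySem

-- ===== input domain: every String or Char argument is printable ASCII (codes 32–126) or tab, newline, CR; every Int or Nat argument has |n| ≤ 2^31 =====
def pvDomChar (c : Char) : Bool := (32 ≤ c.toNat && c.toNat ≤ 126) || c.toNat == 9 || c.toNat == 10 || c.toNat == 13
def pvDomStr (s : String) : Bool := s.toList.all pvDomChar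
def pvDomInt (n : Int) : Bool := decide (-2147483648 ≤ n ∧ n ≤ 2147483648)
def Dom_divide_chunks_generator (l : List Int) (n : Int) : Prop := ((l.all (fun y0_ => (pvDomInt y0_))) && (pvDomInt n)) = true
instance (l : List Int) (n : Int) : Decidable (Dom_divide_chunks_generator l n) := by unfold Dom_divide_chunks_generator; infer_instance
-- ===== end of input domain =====

-- B slices the materialized list at precomputed chunk boundaries (step = max(n+1,1)) instead of
-- A's per-item append-and-compare buffering; same cost, different decomposition ("alternative").

-- ===== PORT A =====
-- A's generator loop as structural recursion over the same state (idx, buffer);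
-- returns (final idx, final buffer, yielded pairs in order).
def dcgLoopA (n : Int) (idx : Int) (ls : List Int) : List Int → Int × List Int × List (Int × List Int)
  | [] => (idx, ls, [])
  | item :: rest =>
    let ls' := ls ++ [item]
    if (ls'.length : Int) > n then
      let r := dcgLoopA n (idx + 1) [] rest
      (r.1, r.2.1, (idx + 1, ls') :: r.2.2)
    else
      dcgLoopA n idx ls' rest

def divide_chunks_generator (l : List Int) (n : Int) : List (Int × List Int) :=
  let r := dcgLoopA n 0 [] l
  if (r.2.1.length : Int) > 0 then r.2.2 ++ [(r.1 + 1, r.2.1)] else r.2.2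

-- ===== PORT B =====
-- chunksB s l = consecutive slices of l of size (s+1); called with s = step - 1.
def chunksB (s : Nat) : List Int → List (List Int)
  | [] => []
  | x :: xs => ((x :: xs).take (s + 1)) :: chunksB s ((x :: xs).drop (s + 1))
termination_by l => l.length
decreasing_by simp

-- enumerate(…, start=i)
def numberFrom (i : Int) : List (List Int) → List (Int × List Int)
  | [] => []
  | c :: cs => (i, c) :: numberFrom (i + 1) cs

def divide_chunks_generator_alt (l : List Int) (n : Int) : List (Int × List Int) :=
  numberFrom 1 (chunksB ((max (n + 1) 1).toNat - 1) l)

-- ===== PRECONDITION & SPEC =====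
def Spec_divide_chunks_generator (l : List Int) (n : Int) (out : List (Int × List Int)) : Prop := out = divide_chunks_generator_alt l n
instance (l : List Int) (n : Int) (out : List (Int × List Int)) : Decidable (Spec_divide_chunks_generator l n out) := by unfold Spec_divide_chunks_generator; infer_instance

-- ===== CLAIM (what is proved, stated in full; the proofs are below) =====
def Claim_equal_divide_chunks_generator : Prop := ∀ (l : List Int) (n : Int), Dom_divide_chunks_generator l n → Spec_divide_chunks_generator l n (divide_chunks_generator l n)

-- ===== LEMMAS AND PROOFS =====

theorem chunksB_nil (s : Nat) : chunksB s [] = [] := by simp [chunksB]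

theorem chunksB_cons (s : Nat) (x : Int) (xs : List Int) :
    chunksB s (x :: xs) = ((x :: xs).take (s + 1)) :: chunksB s ((x :: xs).drop (s + 1)) := by
  simp [chunksB]

-- a full slice at the front is one chunk
theorem chunksB_full (s : Nat) (c rest : List Int) (hc : c.length = s + 1) :
    chunksB s (c ++ rest) = c :: chunksB s rest := by
  cases hcons : c ++ rest with
  | nil =>
    have : c = [] := by cases c <;> simp_all
    simp [this] at hc
  | cons y ys =>
    rw [chunksB_cons, ← hcons]
    congr 1
    · rw [List.take_append_of_le_length (by omega), List.take_of_length_le (by omega)]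
    · rw [List.drop_append_of_le_length (by omega), List.drop_eq_nil_of_le (by omega)]
      simp

-- Invariant: running A's loop with a not-yet-full buffer `ls`, then flushing, produces
-- exactly the (idx+1)-numbered (s+1)-slices of ls ++ l.
theorem dcgLoopA_eq (n : Int) (s : Nat) (hs : (s : Int) + 1 = max (n + 1) 1) :
    ∀ (l ls : List Int) (idx : Int), ls.length < s + 1 →
      (let r := dcgLoopA n idx ls l
       if (r.2.1.length : Int) > 0 then r.2.2 ++ [(r.1 + 1, r.2.1)] else r.2.2)
      = numberFrom (idx + 1) (chunksB s (ls ++ l)) := by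
  have hmax : max (n + 1) 1 = n + 1 ∨ max (n + 1) 1 = (1 : Int) := max_choice _ _
  intro l
  induction l with
  | nil =>
    intro ls idx hlen
    cases ls with
    | nil => simp [dcgLoopA, chunksB_nil, numberFrom]
    | cons x xs =>
      have hch : chunksB s (x :: xs) = [x :: xs] := by
        rw [chunksB_cons, List.drop_eq_nil_of_le (by omega), chunksB_nil,
            List.take_of_length_le (by omega)]
      simp [dcgLoopA, hch, numberFrom]
  | cons item rest ih =>
    intro ls idx hlen
    have hl1 : 1 ≤ (ls ++ [item]).length := by simp
    by_cases hfl : ((ls ++ [item]).length : Int) > n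
    · -- flush: the buffer is exactly full (length = s+1)
      have hfull : (ls ++ [item]).length = s + 1 := by
        have hl2 : (ls ++ [item]).length = ls.length + 1 := by simp
        rcases hmax with h | h <;> rw [h] at hs <;> omega
      have hch : chunksB s (ls ++ item :: rest) = (ls ++ [item]) :: chunksB s rest := by
        rw [show ls ++ item :: rest = (ls ++ [item]) ++ rest by simp]
        exact chunksB_full s _ rest hfull
      have hcond : n ≤ (ls.length : Int) := by
        have hl2 : (ls ++ [item]).length = ls.length + 1 := by simp
        omega
      have hrec := ih [] (idx + 1) (by simp)
      simp only [List.nil_append] at hrec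
      by_cases h0 : ((dcgLoopA n (idx + 1) [] rest).2.1.length : Int) > 0 <;>
        simp only [h0] at hrec <;>
        simp_all [dcgLoopA, numberFrom]
    · -- no flush: buffer grows, list regrouped
      have hlen' : (ls ++ [item]).length < s + 1 := by
        have hl2 : (ls ++ [item]).length = ls.length + 1 := by simp
        rcases hmax with h | h <;> rw [h] at hs <;> omega
      have hrec := ih (ls ++ [item]) idx hlen'
      simp only [dcgLoopA, hfl, ite_false]
      rw [show ls ++ item :: rest = (ls ++ [item]) ++ rest by simp]
      simpa using hrec

-- ===== VERDICT (by name: the statement is the Claim_ definition above) =====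
theorem divide_chunks_generator_spec : Claim_equal_divide_chunks_generator := by
  intro l n _
  unfold Spec_divide_chunks_generator divide_chunks_generator divide_chunks_generator_alt
  have hge1 : (1 : Int) ≤ max (n + 1) 1 := le_max_right _ _
  have hs : (((max (n + 1) 1).toNat - 1 : Nat) : Int) + 1 = max (n + 1) 1 := by
    generalize max (n + 1) 1 = m at hge1 ⊢
    omega
  have h := dcgLoopA_eq n ((max (n + 1) 1).toNat - 1) hs l [] 0 (by simp)
  simpa using h
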